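-- pv_equiv track=rewrite | github.com/alexiocassanifm/deepagents | examples/deep_planning/src/context/compact_integration.py | _format_technical_concepts
-- ===== SOURCE A (Python) =====
-- from typing import Dict, Any, List, Optional, Tuple
--
-- def _format_technical_concepts(concepts: List[str]) -> str:
--     """Formatta i concetti tecnici."""
--     if not concepts:
--         return "No specific technical concepts identified."
--
--     # Raggruppa per categoria
--     categories = {
--         "Languages & Frameworks": [],
--         "Tools & Platforms": [],
--         "AI & ML": [],
--         "Other": []
--     }
--
--     ai_terms = ["langraph", "langchain", "openai", "anthropic", "claude", "gpt", "llm", "ai", "ml", "mcp"]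
--     tool_terms = ["docker", "kubernetes", "aws", "azure", "gcp", "git", "github", "gitlab"]
--     lang_terms = ["python", "javascript", "typescript", "react", "vue", "angular", "node.js"]
--
--     for concept in concepts:
--         concept_lower = concept.lower()
--         if concept_lower in ai_terms:
--             categories["AI & ML"].append(concept)
--         elif concept_lower in tool_terms:
--             categories["Tools & Platforms"].append(concept)
--         elif concept_lower in lang_terms:
--             categories["Languages & Frameworks"].append(concept)
--         else:
--             categories["Other"].append(concept)
--
--     formatted = []
--     for category, items in categories.items():
--         if items:
--             formatted.append(f"**{category}**: {', '.join(items)}")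
--
--     return "\n".join(formatted) if formatted else "No specific technical concepts identified."
-- ===== SOURCE B (Python) =====
-- def _format_technical_concepts(concepts):
--     """Formatta i concetti tecnici."""
--     if not concepts:
--         return "No specific technical concepts identified."
--
--     ai_terms = ["langraph", "langchain", "openai", "anthropic", "claude", "gpt", "llm", "ai", "ml", "mcp"]
--     tool_terms = ["docker", "kubernetes", "aws", "azure", "gcp", "git", "github", "gitlab"]
--     lang_terms = ["python", "javascript", "typescript", "react", "vue", "angular", "node.js"]
--
--     lines = []
--     for name, terms in [("Languages & Frameworks", lang_terms),
--                         ("Tools & Platforms", tool_terms),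
--                         ("AI & ML", ai_terms)]:
--         items = [c for c in concepts if c.lower() in terms]
--         if items:
--             lines.append(f"**{name}**: {', '.join(items)}")
--
--     all_terms = ai_terms + tool_terms + lang_terms
--     other = [c for c in concepts if c.lower() not in all_terms]
--     if other:
--         lines.append(f"**Other**: {', '.join(other)}")
--
--     return "\n".join(lines)
-- ===== Notes on version B (the rewrite author's own statement) =====
-- stated objective: idiomatic
-- what changed: A makes one pass over concepts with an if/elif chain that appends into a dict of four buckets and then iterates the dict; B instead builds each output line directly by filtering concepts once per category (three membership filters plus a complement filter for 'Other'), dropping the dict and the classifying loop.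
import Mathlib
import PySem

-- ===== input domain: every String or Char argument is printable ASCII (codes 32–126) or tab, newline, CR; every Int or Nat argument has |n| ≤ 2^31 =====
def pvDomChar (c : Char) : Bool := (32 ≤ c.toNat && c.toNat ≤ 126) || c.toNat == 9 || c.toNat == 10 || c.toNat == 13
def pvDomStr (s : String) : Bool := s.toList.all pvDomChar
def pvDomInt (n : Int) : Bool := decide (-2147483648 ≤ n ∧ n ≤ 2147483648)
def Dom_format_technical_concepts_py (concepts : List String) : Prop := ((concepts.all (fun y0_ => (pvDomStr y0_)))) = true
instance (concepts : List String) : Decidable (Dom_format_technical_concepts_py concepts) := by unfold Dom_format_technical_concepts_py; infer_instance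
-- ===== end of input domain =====

-- B replaces A's single classifying pass (if/elif chain filling a dict of buckets) by one
-- filter of `concepts` per category in the dict's fixed order (objective: idiomatic; no speed claim).

-- shared literal term lists (module-level data in both Pythons)
def pvAiTerms : List String := ["langraph", "langchain", "openai", "anthropic", "claude", "gpt", "llm", "ai", "ml", "mcp"]
def pvToolTerms : List String := ["docker", "kubernetes", "aws", "azure", "gcp", "git", "github", "gitlab"]
def pvLangTerms : List String := ["python", "javascript", "typescript", "react", "vue", "angular", "node.js"]

-- ===== PORT A =====
-- A's dict has four fixed literal keys; its buckets are ported as a 4-tuple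
-- (Languages, Tools, AI, Other) and `categories.items()` as the explicit 4-element list
-- in insertion order — order and contents exactly as the Python dict.
-- the body of A's for-loop (the if/elif chain appending into the buckets)
def pvClassifyStep (st : List String × List String × List String × List String)
    (concept : String) : List String × List String × List String × List String :=
  let concept_lower := PySem.Str.lower concept
  if pvAiTerms.contains concept_lower then
    (st.1, st.2.1, st.2.2.1 ++ [concept], st.2.2.2)
  else if pvToolTerms.contains concept_lower then
    (st.1, st.2.1 ++ [concept], st.2.2.1, st.2.2.2)
  else if pvLangTerms.contains concept_lower then
    (st.1 ++ [concept], st.2.1, st.2.2.1, st.2.2.2)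
  else
    (st.1, st.2.1, st.2.2.1, st.2.2.2 ++ [concept])

def format_technical_concepts_py (concepts : List String) : String :=
  if concepts = [] then "No specific technical concepts identified."
  else
    let st := concepts.foldl pvClassifyStep ([], [], [], [])
    let formatted := [("Languages & Frameworks", st.1), ("Tools & Platforms", st.2.1),
                      ("AI & ML", st.2.2.1), ("Other", st.2.2.2)].foldl
      (fun (acc : List String) (p : String × List String) =>
        if p.2 ≠ [] then acc ++ ["**" ++ p.1 ++ "**: " ++ PySem.Str.join ", " p.2] else acc) []
    if formatted ≠ [] then PySem.Str.join "\n" formatted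
    else "No specific technical concepts identified."

-- ===== PORT B =====
def format_technical_concepts_py_alt (concepts : List String) : String :=
  if concepts = [] then "No specific technical concepts identified."
  else
    let lines := [("Languages & Frameworks", pvLangTerms), ("Tools & Platforms", pvToolTerms),
                  ("AI & ML", pvAiTerms)].foldl
      (fun (acc : List String) (b : String × List String) =>
        let items := concepts.filter (fun c => b.2.contains (PySem.Str.lower c))
        if items ≠ [] then acc ++ ["**" ++ b.1 ++ "**: " ++ PySem.Str.join ", " items] else acc) []
    let all_terms := pvAiTerms ++ pvToolTerms ++ pvLangTerms
    let other := concepts.filter (fun c => !(all_terms.contains (PySem.Str.lower c)))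
    let lines := if other ≠ [] then lines ++ ["**Other**: " ++ PySem.Str.join ", " other] else lines
    PySem.Str.join "\n" lines

-- ===== PRECONDITION & SPEC =====
def Spec_format_technical_concepts_py (concepts : List String) (out : String) : Prop := out = format_technical_concepts_py_alt concepts
instance (concepts : List String) (out : String) : Decidable (Spec_format_technical_concepts_py concepts out) := by unfold Spec_format_technical_concepts_py; infer_instance

-- ===== CLAIM (what is proved, stated in full; the proofs are below) =====
def Claim_equal_format_technical_concepts_py : Prop := ∀ (concepts : List String), Dom_format_technical_concepts_py concepts → Spec_format_technical_concepts_py concepts (format_technical_concepts_py concepts)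

-- ===== LEMMAS AND PROOFS =====

-- the three predicates of A's elif chain, as functions of the lowered concept
def pFAi (c : String) : Bool := pvAiTerms.contains (PySem.Str.lower c)
def pFTool (c : String) : Bool := !pFAi c && pvToolTerms.contains (PySem.Str.lower c)
def pFLang (c : String) : Bool := !pFAi c && !pFTool c && pvLangTerms.contains (PySem.Str.lower c)
def pFOther (c : String) : Bool := !pFAi c && !pFTool c && !pFLang c

lemma classify_foldl (cs : List String) (l t a o : List String) :
    cs.foldl pvClassifyStep (l, t, a, o)
    = (l ++ cs.filter pFLang, t ++ cs.filter pFTool, a ++ cs.filter pFAi, o ++ cs.filter pFOther) := by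
  induction cs generalizing l t a o with
  | nil => simp
  | cons c cs ih =>
    simp only [List.foldl_cons, List.filter_cons]
    by_cases hA : PySem.Str.lower c ∈ pvAiTerms <;>
      by_cases hT : PySem.Str.lower c ∈ pvToolTerms <;>
      by_cases hL : PySem.Str.lower c ∈ pvLangTerms <;>
      simp [pvClassifyStep, hA, hT, hL, pFAi, pFTool, pFLang, pFOther, ih, List.append_assoc]

-- membership in one term list excludes the others (the three lists are pairwise disjoint)
lemma terms_disjoint (x : String) (h : x ∈ pvToolTerms ∨ x ∈ pvLangTerms) :
    x ∉ pvAiTerms := by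
  rcases h with h | h <;>
    · simp only [pvToolTerms, pvLangTerms, List.mem_cons, List.not_mem_nil, or_false] at h
      rcases h with rfl | rfl | rfl | rfl | rfl | rfl | rfl | rfl <;> decide

lemma terms_disjoint2 (x : String) (h : x ∈ pvLangTerms) : x ∉ pvToolTerms := by
  simp only [pvLangTerms, List.mem_cons, List.not_mem_nil, or_false] at h
  rcases h with rfl | rfl | rfl | rfl | rfl | rfl | rfl <;> decide

lemma filter_lang (cs : List String) :
    cs.filter (fun c => pvLangTerms.contains (PySem.Str.lower c)) = cs.filter pFLang := by
  apply List.filter_congr; intro c _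
  by_cases hL : PySem.Str.lower c ∈ pvLangTerms
  · have hA := terms_disjoint _ (Or.inr hL)
    have hT := terms_disjoint2 _ hL
    simp [pFLang, pFAi, pFTool, hL, hA, hT]
  · simp [pFLang, hL]

lemma filter_tool (cs : List String) :
    cs.filter (fun c => pvToolTerms.contains (PySem.Str.lower c)) = cs.filter pFTool := by
  apply List.filter_congr; intro c _
  by_cases hT : PySem.Str.lower c ∈ pvToolTerms
  · have hA := terms_disjoint _ (Or.inl hT)
    simp [pFTool, pFAi, hT, hA]
  · simp [pFTool, hT]

lemma filter_ai (cs : List String) :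
    cs.filter (fun c => pvAiTerms.contains (PySem.Str.lower c)) = cs.filter pFAi := by
  rfl

lemma filter_other (cs : List String) :
    cs.filter (fun c => !((pvAiTerms ++ pvToolTerms ++ pvLangTerms).contains (PySem.Str.lower c)))
      = cs.filter pFOther := by
  apply List.filter_congr; intro c _
  simp only [pFOther, pFLang, pFTool, pFAi, List.contains_append]
  cases hA : pvAiTerms.contains (PySem.Str.lower c) <;>
    cases hT : pvToolTerms.contains (PySem.Str.lower c) <;>
    cases hL : pvLangTerms.contains (PySem.Str.lower c) <;> simp

-- every concept falls in one of the four buckets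
lemma covers (c : String) (hA : pFAi c = false) (hT : pFTool c = false) (hL : pFLang c = false) :
    pFOther c = true := by
  simp [pFOther, hA, hT, hL]

-- ===== VERDICT (by name: the statement is the Claim_ definition above) =====
theorem format_technical_concepts_py_spec : Claim_equal_format_technical_concepts_py := by
  intro concepts _
  show format_technical_concepts_py concepts = format_technical_concepts_py_alt concepts
  unfold format_technical_concepts_py format_technical_concepts_py_alt
  by_cases hnil : concepts = []
  · simp [hnil]
  · simp only [if_neg hnil, classify_foldl, List.nil_append, List.foldl_cons, List.foldl_nil,
      filter_lang, filter_tool, filter_ai, filter_other]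
    by_cases hL : concepts.filter pFLang = [] <;>
      by_cases hT : concepts.filter pFTool = [] <;>
      by_cases hA : concepts.filter pFAi = [] <;>
      by_cases hO : concepts.filter pFOther = [] <;>
      simp [hL, hT, hA, hO]
    -- remaining case: all four buckets empty although concepts ≠ []
    obtain ⟨c, cs, rfl⟩ := List.exists_cons_of_ne_nil hnil
    simp only [List.filter_cons] at hL hT hA hO
    by_cases h1 : pFAi c
    · simp [h1] at hA
    · by_cases h2 : pFTool c
      · simp [h2] at hT
      · by_cases h3 : pFLang c
        · simp [h3] at hL
        · have := covers c (by simpa using h1) (by simpa using h2) (by simpa using h3)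
          simp [this] at hO
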